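-- pv_equiv track=rewrite | github.com/Epecb/vk-playlist-download | decode.py | vk_s
-- ===== SOURCE A (Python) =====
-- def vk_ss(v_t, v_e):
--     """
--     method s
--     """
--     i = len(v_t)
--     v_o = []
--     if i:
--         v_a = i
--         v_e = int(v_e)
--         v_e = abs(v_e)
--         while v_a:
--             v_a = v_a - 1
--             v_e = (i * (v_a + 1) ^ v_e + v_a) % i
--             # v_e = (v_e + v_e * (v_a + i) / v_e)
--             # v_o.append(v_e % i)
--             v_o.append(v_e)
--     return list(reversed(v_o))
--
-- def vk_s(v_t, v_e):
--     """
--     method s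
--     """
--     i = len(v_t)
--     if i:
--         v_o = vk_ss(v_t, v_e)
--         v_a = 0
--         v_t = list(v_t)
--         v_a = 1
--         while v_a < i:
--             tmp = v_t[int(v_o[i - 1 - v_a])]
--             v_t[int(v_o[i - 1 - v_a])] = v_t[v_a]
--             v_t[v_a] = tmp
--             v_a += 1
--         return ''.join(v_t)
-- ===== SOURCE B (Python) =====
-- def vk_s(v_t, v_e):
--     i = len(v_t)
--     if not i:
--         return None
--     v_e = abs(int(v_e))
--     t = list(v_t)
--     m = 0
--     for a in range(i - 1, -1, -1):
--         v_e = (i * (a + 1) ^ v_e + a) % i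
--         if m >= 1:
--             t[v_e], t[m] = t[m], t[v_e]
--         m += 1
--     return ''.join(t)
-- ===== Notes on version B (the rewrite author's own statement) =====
-- stated objective: simpler
-- what changed: B fuses A's two phases (helper vk_ss building the full recurrence list, reversing it, then a second indexing loop) into one helper-free pass that computes each recurrence value and performs the corresponding swap immediately, eliminating the intermediate reversed array.
import Mathlib
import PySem

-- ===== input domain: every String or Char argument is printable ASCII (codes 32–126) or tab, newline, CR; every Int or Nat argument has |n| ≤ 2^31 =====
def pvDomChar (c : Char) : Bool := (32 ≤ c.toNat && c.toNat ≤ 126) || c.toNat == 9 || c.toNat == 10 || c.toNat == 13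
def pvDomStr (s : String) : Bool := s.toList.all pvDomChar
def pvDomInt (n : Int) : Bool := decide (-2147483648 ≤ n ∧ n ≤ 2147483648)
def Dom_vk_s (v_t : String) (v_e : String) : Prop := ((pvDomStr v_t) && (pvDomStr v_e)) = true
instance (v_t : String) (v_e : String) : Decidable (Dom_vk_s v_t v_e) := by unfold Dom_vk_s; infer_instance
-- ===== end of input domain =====

-- B fuses A's two phases (build recurrence list, reverse, second swap loop) into one pass; objective: simpler.

-- ===== PORT A =====
-- while-loop of vk_ss: v_a counts down; every value of v_e after the first assignment is
-- nonnegative (abs, then % i with i > 0), so the state is kept as Nat and Python's '^' on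
-- these nonnegative ints is exactly Nat '^^^'; the append order is A's (reversed at the end).
def vkssLoop (i : Nat) (v_a : Nat) (e : Nat) (acc : List Nat) : List Nat :=
  match v_a with
  | 0 => acc
  | Nat.succ a =>
    let e' := ((i * (a + 1)) ^^^ (e + a)) % i
    vkssLoop i a e' (acc ++ [e'])

-- vk_ss; Python raises ValueError when int(v_e) fails — 'none' there (excluded by Pre_vk_s)
def vk_ssPort (v_t : String) (v_e : String) : Option (List Nat) :=
  let i := v_t.toList.length
  if i ≠ 0 then
    match PySem.Int.ofStr? v_e with
    | none => none
    | some z => some ((vkssLoop i i z.natAbs []).reverse)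
  else some []

-- while-loop of vk_s: indices read from v_o are always in [0, i) (each is some e' % i),
-- so getD/set are exact for Python's v_t[...] reads and writes.
def vkSwapLoop (i : Nat) (o : List Nat) (v_a : Nat) (t : List Char) : List Char :=
  if v_a < i then
    let idx := o.getD (i - 1 - v_a) 0
    let tmp := t.getD idx ' '
    let t1 := t.set idx (t.getD v_a ' ')
    let t2 := t1.set v_a tmp
    vkSwapLoop i o (v_a + 1) t2
  else t
termination_by i - v_a

def vk_s (v_t : String) (v_e : String) : Option String :=
  let i := v_t.toList.length
  if i ≠ 0 then
    match vk_ssPort v_t v_e with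
    | none => none
    | some o => some (String.ofList (vkSwapLoop i o 1 v_t.toList))
  else none

-- ===== PORT B =====
-- B's single for-loop: a counts i-1 down to 0, m counts up; as in port A the running v_e is a
-- Nat and the in-range getD/set render Python's simultaneous swap t[e],t[m]=t[m],t[e].
def vkAltLoop (i : Nat) (e : Nat) (m : Nat) (a : Nat) (t : List Char) : List Char :=
  let e' := ((i * (a + 1)) ^^^ (e + a)) % i
  let t' := if 1 ≤ m then
      let x := t.getD e' ' '
      let y := t.getD m ' '
      (t.set e' y).set m x
    else t
  match a with
  | 0 => t'
  | Nat.succ a' => vkAltLoop i e' (m + 1) a' t'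

def vk_s_alt (v_t : String) (v_e : String) : Option String :=
  let i := v_t.toList.length
  if i = 0 then none
  else
    match PySem.Int.ofStr? v_e with
    | none => none   -- Python raises ValueError here (excluded by Pre_vk_s)
    | some z => some (String.ofList (vkAltLoop i z.natAbs 0 (i - 1) v_t.toList))

-- ===== PRECONDITION & SPEC =====
-- Pre_ excludes only the inputs where Python A raises: a nonempty v_t together with a v_e that
-- int() cannot parse (ValueError).
def Pre_vk_s (v_t : String) (v_e : String) : Prop :=
  v_t = "" ∨ (PySem.Int.ofStr? v_e).isSome = true
instance (v_t : String) (v_e : String) : Decidable (Pre_vk_s v_t v_e) := by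
  unfold Pre_vk_s; infer_instance

def pvWitness_vk_s : String × String := ("abcdef", " 7 ")

def Spec_vk_s (v_t : String) (v_e : String) (out : Option String) : Prop := out = vk_s_alt v_t v_e
instance (v_t : String) (v_e : String) (out : Option String) : Decidable (Spec_vk_s v_t v_e out) := by unfold Spec_vk_s; infer_instance

-- ===== CLAIM (what is proved, stated in full; the proofs are below) =====
def Claim_equal_vk_s : Prop := ∀ (v_t : String) (v_e : String), Dom_vk_s v_t v_e → Pre_vk_s v_t v_e → Spec_vk_s v_t v_e (vk_s v_t v_e)

-- ===== LEMMAS AND PROOFS =====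

-- the recurrence values for a, a-1, …, 0 in computed order
def pvVals (i : Nat) (a : Nat) (e : Nat) : List Nat :=
  let e' := ((i * (a + 1)) ^^^ (e + a)) % i
  match a with
  | 0 => [e']
  | Nat.succ a' => e' :: pvVals i a' e'

-- perform the swaps (value v ↔ position m) left to right
def pvDoSwaps (m : Nat) (vs : List Nat) (t : List Char) : List Char :=
  match vs with
  | [] => t
  | v :: rest => pvDoSwaps (m + 1) rest ((t.set v (t.getD m ' ')).set m (t.getD v ' '))

theorem pvVals_length (i a e : Nat) : (pvVals i a e).length = a + 1 := by
  induction a generalizing e with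
  | zero => simp [pvVals]
  | succ a ih => simp [pvVals, ih]

theorem vkssLoop_eq (i : Nat) (a : Nat) (e : Nat) (acc : List Nat) :
    vkssLoop i (a + 1) e acc = acc ++ pvVals i a e := by
  induction a generalizing e acc with
  | zero => simp [vkssLoop, pvVals]
  | succ a ih =>
    rw [show vkssLoop i (a + 1 + 1) e acc
        = vkssLoop i (a + 1) (((i * (a + 1 + 1)) ^^^ (e + (a + 1))) % i)
            (acc ++ [((i * (a + 1 + 1)) ^^^ (e + (a + 1))) % i]) from rfl, ih]
    simp [pvVals]

theorem vkAltLoop_ge1 (i : Nat) (a : Nat) (e m : Nat) (t : List Char) (hm : 1 ≤ m) :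
    vkAltLoop i e m a t = pvDoSwaps m (pvVals i a e) t := by
  induction a generalizing e m t with
  | zero => simp [vkAltLoop, pvVals, pvDoSwaps, hm]
  | succ a ih =>
    simp only [vkAltLoop, pvVals, pvDoSwaps, if_pos hm]
    exact ih _ _ _ (by omega)

theorem vkAltLoop_start (i : Nat) (a : Nat) (e : Nat) (t : List Char) :
    vkAltLoop i e 0 a t = pvDoSwaps 1 (pvVals i a e).tail t := by
  cases a with
  | zero => simp [vkAltLoop, pvVals, pvDoSwaps]
  | succ a => simp [vkAltLoop, pvVals, vkAltLoop_ge1 i a _ 1 t (le_refl 1)]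

theorem vkSwapLoop_eq (L : List Nat) (t : List Char) (v_a : Nat) :
    vkSwapLoop L.length L.reverse v_a t = pvDoSwaps v_a (L.drop v_a) t := by
  by_cases h : v_a < L.length
  · rw [vkSwapLoop]
    have hrev : L.reverse.getD (L.length - 1 - v_a) 0 = L.getD v_a 0 := by
      have h1 : L.length - 1 - v_a < L.reverse.length := by simp; omega
      rw [List.getD_eq_getElem _ _ h1, List.getD_eq_getElem _ _ h]
      rw [List.getElem_reverse]
      congr 1
      omega
    rw [if_pos h, hrev]
    rw [vkSwapLoop_eq L _ (v_a + 1)]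
    rw [List.drop_eq_getElem_cons h]
    rw [pvDoSwaps]
    rw [List.getD_eq_getElem _ _ h]
  · rw [vkSwapLoop, if_neg h]
    rw [List.drop_eq_nil_of_le (by omega), pvDoSwaps]
termination_by L.length - v_a

theorem vk_s_spec : Claim_equal_vk_s := by
  intro v_t v_e _ _
  unfold Spec_vk_s vk_s vk_s_alt vk_ssPort
  cases hL : v_t.toList with
  | nil => simp
  | cons c cs =>
    simp only
    have hlen : (c :: cs).length ≠ 0 := by simp
    rw [if_pos hlen, if_neg hlen]
    cases hp : PySem.Int.ofStr? v_e with
    | none => rfl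
    | some z =>
      simp only
      set i := (c :: cs).length with hi
      have hi1 : 1 ≤ i := by simp [hi]
      have hL' : i = (i - 1) + 1 := by omega
      set L := pvVals i (i - 1) z.natAbs with hLdef
      have hlenL : L.length = i := by rw [hLdef, pvVals_length]; omega
      have h1 : vkssLoop i i z.natAbs [] = L := by
        have h := vkssLoop_eq i (i - 1) z.natAbs []
        rw [← hL'] at h
        simpa [hLdef] using h
      have h2 : vkSwapLoop i L.reverse 1 (c :: cs) = pvDoSwaps 1 (L.drop 1) (c :: cs) := by
        rw [← hlenL]
        exact vkSwapLoop_eq L (c :: cs) 1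
      rw [if_pos hlen, h1]
      simp only
      rw [h2, vkAltLoop_start, ← hLdef, List.drop_one]

-- ===== VERDICT (by name: the statement is the Claim_ definition above) =====
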